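-- pv_equiv track=rewrite | github.com/RossLab/Bradysia-GRCs | scripts/phylogeny/nex2table_of_L_neighbors.py | indices2assignment
-- ===== SOURCE A (Python) =====
-- l_string = 'L-sciara_coprophila'
--
-- sciaridae = set(['A-sciara_coprophila', 'phytosciara_flavipes', 'trichosia_splendens'])
--
-- cecidomyiidae = set(['mayetiola_destructor', 'porricondyla_nigripennis', 'catotricha_subobsoleta', 'lestremia_cinerea'])
--
-- def indices2assignment(tree_node, index2sp):
--     member_sciaridae = False
--     member_cecidomyiidae = False
--     member_others = False
--     for i in tree_node:
--         if index2sp[i] == l_string: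
--             continue
--         elif index2sp[i] in sciaridae:
--             member_sciaridae = True
--             continue
--         elif index2sp[i] in cecidomyiidae:
--             member_cecidomyiidae = True
--             continue
--         else:
--             member_others = True
--     if member_sciaridae and not member_cecidomyiidae and not member_others:
--         return "sciaridae"
--     if member_cecidomyiidae and not member_sciaridae and not member_others:
--         return "cecidomyiidae"
--     return "other"
-- ===== SOURCE B (Python) =====
-- l_string = 'L-sciara_coprophila'
--
-- sciaridae = set(['A-sciara_coprophila', 'phytosciara_flavipes', 'trichosia_splendens'])
--
-- cecidomyiidae = set(['mayetiola_destructor', 'porricondyla_nigripennis', 'catotricha_subobsoleta', 'lestremia_cinerea'])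
--
-- def indices2assignment(tree_node, index2sp):
--     species = {index2sp[i] for i in tree_node} - {l_string}
--     if species and species <= sciaridae:
--         return "sciaridae"
--     if species and species <= cecidomyiidae:
--         return "cecidomyiidae"
--     return "other"
-- ===== Notes on version B (the rewrite author's own statement) =====
-- stated objective: simpler
-- what changed: Replaces the three accumulated boolean flags and branch-per-element loop with building the set of distinct non-L species once and classifying it by two subset tests.
import Mathlib
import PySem

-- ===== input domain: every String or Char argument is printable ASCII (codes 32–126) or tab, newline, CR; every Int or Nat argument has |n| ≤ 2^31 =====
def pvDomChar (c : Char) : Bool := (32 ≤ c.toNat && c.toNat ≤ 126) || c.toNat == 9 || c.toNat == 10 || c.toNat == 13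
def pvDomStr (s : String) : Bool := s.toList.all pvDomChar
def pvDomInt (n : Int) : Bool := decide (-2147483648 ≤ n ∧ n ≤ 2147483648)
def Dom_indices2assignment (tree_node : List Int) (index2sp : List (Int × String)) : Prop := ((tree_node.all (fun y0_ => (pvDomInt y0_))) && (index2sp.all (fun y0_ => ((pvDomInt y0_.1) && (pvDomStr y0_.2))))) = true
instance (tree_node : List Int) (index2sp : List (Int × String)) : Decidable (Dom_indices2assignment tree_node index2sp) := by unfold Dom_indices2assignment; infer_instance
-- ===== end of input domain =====

-- B builds the set of distinct non-L species once and classifies it by two subset tests,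
-- instead of A's three accumulated boolean flags set in a branch-per-element loop (objective: simpler).

-- module-level constants shared by both Pythons
def lString : String := "L-sciara_coprophila"
def sciaridaeSet : PySem.Set String :=
  PySem.Set.ofList ["A-sciara_coprophila", "phytosciara_flavipes", "trichosia_splendens"]
def cecidomyiidaeSet : PySem.Set String :=
  PySem.Set.ofList ["mayetiola_destructor", "porricondyla_nigripennis", "catotricha_subobsoleta", "lestremia_cinerea"]

-- ===== PORT A =====
def indices2assignment (tree_node : List Int) (index2sp : List (Int × String)) : String :=
  let st := tree_node.foldl (fun (st : Bool × Bool × Bool) i =>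
    let sp := PySem.Dict.getD (PySem.Dict.mk index2sp) i ""   -- under Pre_, i is always a key; "" never used
    if sp == lString then st
    else if PySem.Set.contains sciaridaeSet sp then (true, st.2.1, st.2.2)
    else if PySem.Set.contains cecidomyiidaeSet sp then (st.1, true, st.2.2)
    else (st.1, st.2.1, true)) (false, false, false)
  if st.1 && !st.2.1 && !st.2.2 then "sciaridae"
  else if st.2.1 && !st.1 && !st.2.2 then "cecidomyiidae"
  else "other"

-- ===== PORT B =====
def indices2assignment_alt (tree_node : List Int) (index2sp : List (Int × String)) : String :=
  let species := PySem.Set.diff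
    (PySem.Set.ofList (tree_node.map (fun i => PySem.Dict.getD (PySem.Dict.mk index2sp) i "")))
    [lString]
  if !species.isEmpty && PySem.Set.issubset species sciaridaeSet then "sciaridae"
  else if !species.isEmpty && PySem.Set.issubset species cecidomyiidaeSet then "cecidomyiidae"
  else "other"

-- ===== PRECONDITION & SPEC =====
-- Pre_: every index in tree_node must be a key of index2sp (Python raises KeyError otherwise).
def Pre_indices2assignment (tree_node : List Int) (index2sp : List (Int × String)) : Prop :=
  ∀ i ∈ tree_node, PySem.Dict.contains (PySem.Dict.mk index2sp) i = true
instance (tree_node : List Int) (index2sp : List (Int × String)) : Decidable (Pre_indices2assignment tree_node index2sp) := by unfold Pre_indices2assignment; infer_instance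
def pvWitness_indices2assignment : List Int × (List (Int × String)) :=
  ([0, 1, 0], [(0, "A-sciara_coprophila"), (1, "L-sciara_coprophila")])

def Spec_indices2assignment (tree_node : List Int) (index2sp : List (Int × String)) (out : String) : Prop := out = indices2assignment_alt tree_node index2sp
instance (tree_node : List Int) (index2sp : List (Int × String)) (out : String) : Decidable (Spec_indices2assignment tree_node index2sp out) := by unfold Spec_indices2assignment; infer_instance

-- ===== CLAIM (what is proved, stated in full; the proofs are below) =====
def Claim_equal_indices2assignment : Prop := ∀ (tree_node : List Int) (index2sp : List (Int × String)), Dom_indices2assignment tree_node index2sp → Pre_indices2assignment tree_node index2sp → Spec_indices2assignment tree_node index2sp (indices2assignment tree_node index2sp)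

-- ===== LEMMAS AND PROOFS =====

-- characterization of A's flag-setting fold
lemma foldA_char (f : Int → String) (tn : List Int) (s c o : Bool) :
    tn.foldl (fun (st : Bool × Bool × Bool) i =>
      let sp := f i
      if sp == lString then st
      else if PySem.Set.contains sciaridaeSet sp then (true, st.2.1, st.2.2)
      else if PySem.Set.contains cecidomyiidaeSet sp then (st.1, true, st.2.2)
      else (st.1, st.2.1, true)) (s, c, o)
    = (s || tn.any (fun i => !(f i == lString) && PySem.Set.contains sciaridaeSet (f i)),
       c || tn.any (fun i => !(f i == lString) && !PySem.Set.contains sciaridaeSet (f i)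
                      && PySem.Set.contains cecidomyiidaeSet (f i)),
       o || tn.any (fun i => !(f i == lString) && !PySem.Set.contains sciaridaeSet (f i)
                      && !PySem.Set.contains cecidomyiidaeSet (f i))) := by
  induction tn generalizing s c o with
  | nil => simp
  | cons hd tl ih =>
    rw [List.foldl_cons]
    show List.foldl _ (if (f hd == lString) = true then (s, c, o)
      else if PySem.Set.contains sciaridaeSet (f hd) = true then (true, c, o)
      else if PySem.Set.contains cecidomyiidaeSet (f hd) = true then (s, true, o)
      else (s, c, true)) tl = _
    by_cases h1 : (f hd == lString) = true
    · rw [if_pos h1, ih]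
      simp [h1]
    · rw [if_neg h1]
      by_cases h2 : PySem.Set.contains sciaridaeSet (f hd) = true
      · rw [if_pos h2, ih]
        simp only [PySem.Set.contains_iff] at h2
        simp [h1, h2]
      · rw [if_neg h2]
        by_cases h3 : PySem.Set.contains cecidomyiidaeSet (f hd) = true
        · rw [if_pos h3, ih]
          simp only [PySem.Set.contains_iff] at h2 h3
          simp [h1, h2, h3]
        · rw [if_neg h3, ih]
          simp only [PySem.Set.contains_iff] at h2 h3
          simp [h1, h2, h3]

lemma disjoint_sci_cec : ∀ x ∈ sciaridaeSet, x ∉ cecidomyiidaeSet := by decide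

theorem indices2assignment_spec : Claim_equal_indices2assignment := by
  intro tn d _ _
  unfold Spec_indices2assignment indices2assignment indices2assignment_alt
  set f : Int → String := fun i => PySem.Dict.getD (PySem.Dict.mk d) i "" with hf
  rw [foldA_char f tn false false false]
  simp only [Bool.false_or]
  -- name the three flags and the B-side set
  set A1 := tn.any (fun i => !(f i == lString) && PySem.Set.contains sciaridaeSet (f i)) with hA1
  set A2 := tn.any (fun i => !(f i == lString) && !PySem.Set.contains sciaridaeSet (f i)
                      && PySem.Set.contains cecidomyiidaeSet (f i)) with hA2
  set A3 := tn.any (fun i => !(f i == lString) && !PySem.Set.contains sciaridaeSet (f i)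
                      && !PySem.Set.contains cecidomyiidaeSet (f i)) with hA3
  set sp := PySem.Set.diff (PySem.Set.ofList (tn.map f)) [lString] with hsp
  have hmem : ∀ x, x ∈ sp ↔ (∃ i ∈ tn, f i = x) ∧ x ≠ lString := by
    intro x
    simp [hsp, PySem.Set.mem_diff, PySem.Set.mem_ofList, List.mem_map, eq_comm]
  have hne : sp.isEmpty = false ↔ ∃ i ∈ tn, f i ≠ lString := by
    constructor
    · intro h
      rcases List.exists_mem_of_ne_nil sp (by simpa [List.isEmpty_iff] using h) with ⟨x, hx⟩
      rcases (hmem x).1 hx with ⟨⟨i, hi, hfi⟩, hxl⟩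
      exact ⟨i, hi, by rw [hfi]; exact hxl⟩
    · rintro ⟨i, hi, hil⟩
      have : f i ∈ sp := (hmem (f i)).2 ⟨⟨i, hi, rfl⟩, hil⟩
      rcases sp with _ | ⟨y, ys⟩
      · simp at this
      · rfl
  have hsubS : PySem.Set.issubset sp sciaridaeSet = true ↔
      ∀ i ∈ tn, f i ≠ lString → f i ∈ sciaridaeSet := by
    rw [PySem.Set.issubset_iff]
    constructor
    · intro h i hi hil; exact h _ ((hmem (f i)).2 ⟨⟨i, hi, rfl⟩, hil⟩)
    · intro h x hx; rcases (hmem x).1 hx with ⟨⟨i, hi, hfi⟩, hxl⟩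
      subst hfi; exact h i hi hxl
  have hsubC : PySem.Set.issubset sp cecidomyiidaeSet = true ↔
      ∀ i ∈ tn, f i ≠ lString → f i ∈ cecidomyiidaeSet := by
    rw [PySem.Set.issubset_iff]
    constructor
    · intro h i hi hil; exact h _ ((hmem (f i)).2 ⟨⟨i, hi, rfl⟩, hil⟩)
    · intro h x hx; rcases (hmem x).1 hx with ⟨⟨i, hi, hfi⟩, hxl⟩
      subst hfi; exact h i hi hxl
  have e1 : A1 = true ↔ ∃ i ∈ tn, f i ≠ lString ∧ f i ∈ sciaridaeSet := by
    simp [hA1, List.any_eq_true]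
  have e2 : A2 = true ↔ ∃ i ∈ tn, f i ≠ lString ∧ f i ∉ sciaridaeSet ∧ f i ∈ cecidomyiidaeSet := by
    simp [hA2, List.any_eq_true, and_assoc]
  have e3 : A3 = true ↔ ∃ i ∈ tn, f i ≠ lString ∧ f i ∉ sciaridaeSet ∧ f i ∉ cecidomyiidaeSet := by
    simp [hA3, List.any_eq_true, and_assoc]
  by_cases c1 : A1 = true ∧ A2 = false ∧ A3 = false
  · -- A returns "sciaridae"
    obtain ⟨h1, h2, h3⟩ := c1
    rcases e1.1 h1 with ⟨i, hi, hil, hiS⟩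
    have hnsub : ∀ j ∈ tn, f j ≠ lString → f j ∈ sciaridaeSet := by
      intro j hj hjl
      by_contra hjS
      by_cases hjC : f j ∈ cecidomyiidaeSet
      · exact absurd (e2.2 ⟨j, hj, hjl, hjS, hjC⟩) (by simp [h2])
      · exact absurd (e3.2 ⟨j, hj, hjl, hjS, hjC⟩) (by simp [h3])
    simp [h1, h2, h3, hne.2 ⟨i, hi, hil⟩, hsubS.2 hnsub]
  · by_cases c2 : A2 = true ∧ A1 = false ∧ A3 = false
    · -- A returns "cecidomyiidae"
      obtain ⟨h2, h1, h3⟩ := c2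
      rcases e2.1 h2 with ⟨i, hi, hil, hiS, hiC⟩
      have hallC : ∀ j ∈ tn, f j ≠ lString → f j ∈ cecidomyiidaeSet := by
        intro j hj hjl
        by_cases hjS : f j ∈ sciaridaeSet
        · exact absurd (e1.2 ⟨j, hj, hjl, hjS⟩) (by simp [h1])
        · by_contra hjC
          exact absurd (e3.2 ⟨j, hj, hjl, hjS, hjC⟩) (by simp [h3])
      have hnotS : ¬ (∀ j ∈ tn, f j ≠ lString → f j ∈ sciaridaeSet) := by
        intro h; exact hiS (h i hi hil)
      simp [h1, h2, h3, hne.2 ⟨i, hi, hil⟩, hsubC.2 hallC, (not_iff_not.2 hsubS).2 hnotS]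
    · -- A returns "other"
      -- show neither B branch fires
      by_cases hA1t : A1 = true
      · -- some sciaridae member present, but also A2 or A3 true
        have h23 : A2 = true ∨ A3 = true := by
          rcases Bool.eq_false_or_eq_true A2 with h | h
          · exact Or.inl h
          · rcases Bool.eq_false_or_eq_true A3 with h' | h'
            · exact Or.inr h'
            · exact absurd ⟨hA1t, h, h'⟩ c1
        rcases e1.1 hA1t with ⟨i, hi, hil, hiS⟩
        have hnsubC : ¬ (∀ j ∈ tn, f j ≠ lString → f j ∈ cecidomyiidaeSet) := by
          intro h; exact disjoint_sci_cec _ hiS (h i hi hil)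
        have hnsubS : ¬ (∀ j ∈ tn, f j ≠ lString → f j ∈ sciaridaeSet) := by
          rcases h23 with h | h
          · rcases e2.1 h with ⟨j, hj, hjl, hjS, _⟩
            intro hh; exact hjS (hh j hj hjl)
          · rcases e3.1 h with ⟨j, hj, hjl, hjS, _⟩
            intro hh; exact hjS (hh j hj hjl)
        simp [hA1t, (not_iff_not.2 hsubS).2 hnsubS, (not_iff_not.2 hsubC).2 hnsubC]
        intro h2f
        rcases h23 with h | h
        · exact (Bool.false_ne_true (h2f ▸ h)).elim
        · exact h
      · have h1f : A1 = false := by simpa using hA1t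
        by_cases hA3t : A3 = true
        · -- an "other" species present: neither subset holds
          rcases e3.1 hA3t with ⟨i, hi, hil, hiS, hiC⟩
          have hnsubS : ¬ (∀ j ∈ tn, f j ≠ lString → f j ∈ sciaridaeSet) := by
            intro h; exact hiS (h i hi hil)
          have hnsubC : ¬ (∀ j ∈ tn, f j ≠ lString → f j ∈ cecidomyiidaeSet) := by
            intro h; exact hiC (h i hi hil)
          simp [hA3t, h1f, (not_iff_not.2 hsubS).2 hnsubS, (not_iff_not.2 hsubC).2 hnsubC]
        · have h3f : A3 = false := by simpa using hA3t
          by_cases hA2t : A2 = true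
          · -- only cecidomyiidae flags set with A1 false, A3 false: but then c2 holds, contradiction
            exact absurd ⟨hA2t, h1f, h3f⟩ c2
          · -- all flags false: every element is the L string, species empty
            have h2f : A2 = false := by simpa using hA2t
            have hall : ∀ i ∈ tn, f i = lString := by
              intro i hi
              by_contra hil
              by_cases hiS : f i ∈ sciaridaeSet
              · exact absurd (e1.2 ⟨i, hi, hil, hiS⟩) (by simp [h1f])
              · by_cases hiC : f i ∈ cecidomyiidaeSet
                · exact absurd (e2.2 ⟨i, hi, hil, hiS, hiC⟩) (by simp [h2f])
                · exact absurd (e3.2 ⟨i, hi, hil, hiS, hiC⟩) (by simp [h3f])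
            have hempty : sp.isEmpty = true := by
              rcases Bool.eq_false_or_eq_true sp.isEmpty with h | h
              · exact h
              · rcases hne.1 h with ⟨i, hi, hil⟩
                exact absurd (hall i hi) hil
            simp [h1f, h2f, h3f, hempty]
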